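-- pv_equiv track=rewrite | github.com/storrijos/FourSquare-Dataset | src/process_data.py | process_data_hash
-- ===== SOURCE A (Python) =====
-- def add_or_append(dictionary, key, value):
--     if key not in dictionary:
--         dictionary[key] = []
--     dictionary[key].append(value)
--
-- def check_difference_in_array(array1, array2, maxDiff):
--     counter = 0
--     for element1 in array1:
--         for element2 in array2:
--             diff = abs(int(element1) - int(element2))
--             if diff < maxDiff:
--                 counter += 1
--     return counter
--
-- def process_data_hash(items_hash, maxDiff):
--     users_hash = {}
--     for item1_key, item1_value in items_hash.items():
--         for user_id1, user1_array in item1_value.items():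
--             for user_id2, user2_array in item1_value.items():
--                 if user_id1 != user_id2:
--                     counter = check_difference_in_array(user1_array, user2_array, maxDiff)
--                     if counter != 0:
--                         for i in range(counter):
--                             add_or_append(users_hash, user_id1, user_id2)
--     return users_hash
-- ===== SOURCE B (Python) =====
-- from bisect import bisect_left, bisect_right
--
-- def process_data_hash(items_hash, maxDiff):
--     users_hash = {}
--     for item_value in items_hash.values():
--         users = [(uid, arr, sorted(int(e) for e in arr)) for uid, arr in item_value.items()]
--         for u1, a1, _ in users:
--             for u2, _, s2 in users:
--                 if u1 != u2:
--                     counter = 0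
--                     for e1 in a1:
--                         x = int(e1)
--                         c = bisect_left(s2, x + maxDiff) - bisect_right(s2, x - maxDiff)
--                         if c > 0:
--                             counter += c
--                     if counter:
--                         users_hash.setdefault(u1, []).extend([u2] * counter)
--     return users_hash
-- ===== Notes on version B (the rewrite author's own statement) =====
-- stated objective: faster
-- what changed: Replaces the nested all-pairs element scan per user pair with per-user sorted arrays and bisect range queries (count of elements within the open window), keeping the same pair iteration and dict-append order.
import Mathlib
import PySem

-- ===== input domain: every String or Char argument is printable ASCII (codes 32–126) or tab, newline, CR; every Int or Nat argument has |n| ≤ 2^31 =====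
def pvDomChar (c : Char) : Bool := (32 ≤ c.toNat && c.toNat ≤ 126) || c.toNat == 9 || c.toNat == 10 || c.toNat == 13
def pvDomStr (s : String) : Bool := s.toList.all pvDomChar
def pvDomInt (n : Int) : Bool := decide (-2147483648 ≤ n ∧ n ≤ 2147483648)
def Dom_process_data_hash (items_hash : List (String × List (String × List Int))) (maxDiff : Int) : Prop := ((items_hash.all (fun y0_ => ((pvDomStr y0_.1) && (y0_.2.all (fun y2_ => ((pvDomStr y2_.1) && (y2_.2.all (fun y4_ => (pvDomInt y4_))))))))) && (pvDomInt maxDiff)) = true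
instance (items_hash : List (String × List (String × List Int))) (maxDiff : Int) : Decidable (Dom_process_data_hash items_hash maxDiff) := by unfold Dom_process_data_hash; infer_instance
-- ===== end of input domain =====

-- B replaces the nested all-pairs element scan per user pair with per-user sorted arrays
-- and bisect range queries; same pair iteration and dict-append order, so return values agree.
-- ===== PORT A =====
def add_or_append (dictionary : PySem.Dict String (List String)) (key : String) (value : String) : PySem.Dict String (List String) :=
  let d := if dictionary.contains key then dictionary else dictionary.insert key []
  d.modify key [] (fun l => l ++ [value])

def check_difference_in_array (array1 array2 : List Int) (maxDiff : Int) : Int :=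
  array1.foldl (fun counter element1 =>
    array2.foldl (fun counter element2 =>
      if |element1 - element2| < maxDiff then counter + 1 else counter) counter) 0

def process_data_hash (items_hash : List (String × List (String × List Int))) (maxDiff : Int) : List (String × List String) :=
  (items_hash.foldl (fun users_hash item1 =>
    item1.2.foldl (fun users_hash p1 =>
      item1.2.foldl (fun users_hash p2 =>
        if p1.1 ≠ p2.1 then
          let counter := check_difference_in_array p1.2 p2.2 maxDiff
          if counter ≠ 0 then
            (PySem.List.pyRange 0 counter 1).foldl (fun d _ => add_or_append d p1.1 p2.1) users_hash
          else users_hash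
        else users_hash) users_hash) users_hash) PySem.Dict.empty).items

-- ===== PORT B =====
def process_data_hash_alt (items_hash : List (String × List (String × List Int))) (maxDiff : Int) : List (String × List String) :=
  (items_hash.foldl (fun users_hash item =>
    let users := item.2.map (fun p => (p.1, p.2, PySem.List.sorted p.2 (fun e => e) false))
    users.foldl (fun users_hash u1 =>
      users.foldl (fun users_hash u2 =>
        if u1.1 ≠ u2.1 then
          let counter := u1.2.1.foldl (fun counter x =>
            let c : Int := (PySem.List.bisectLeft u2.2.2 (x + maxDiff) : Int)
                         - (PySem.List.bisectRight u2.2.2 (x - maxDiff) : Int)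
            if c > 0 then counter + c else counter) 0
          if counter ≠ 0 then
            (users_hash.setdefault u1.1 []).modify u1.1 [] (fun l => l ++ List.replicate counter.toNat u2.1)
          else users_hash
        else users_hash) users_hash) users_hash) PySem.Dict.empty).items

-- ===== PRECONDITION & SPEC =====
def Spec_process_data_hash (items_hash : List (String × List (String × List Int))) (maxDiff : Int) (out : List (String × List String)) : Prop := out = process_data_hash_alt items_hash maxDiff
instance (items_hash : List (String × List (String × List Int))) (maxDiff : Int) (out : List (String × List String)) : Decidable (Spec_process_data_hash items_hash maxDiff out) := by unfold Spec_process_data_hash; infer_instance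

-- ===== CLAIM (what is proved, stated in full; the proofs are below) =====
def Claim_equal_process_data_hash : Prop := ∀ (items_hash : List (String × List (String × List Int))) (maxDiff : Int), Dom_process_data_hash items_hash maxDiff → Spec_process_data_hash items_hash maxDiff (process_data_hash items_hash maxDiff)

-- ===== LEMMAS AND PROOFS =====

-- a list whose first k positions satisfy p and whose remaining positions do not has countP p = k
theorem pv_countP_eq_of_cut (s : List Int) (p : Int → Bool) (k : Nat) (hk : k ≤ s.length)
    (h : ∀ j (hj : j < s.length), p s[j] = decide (j < k)) : s.countP p = k := by
  induction s generalizing k with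
  | nil => simp at hk ⊢; omega
  | cons a t ih =>
    have h0 := h 0 (by simp)
    cases k with
    | zero =>
      simp at h0
      rw [List.countP_cons_of_neg (p := p) (by simp [h0])]
      exact ih 0 (by omega) (fun j hj => by
        have := h (j+1) (by simpa using Nat.succ_lt_succ hj)
        simpa using this)
    | succ m =>
      simp at h0
      rw [List.countP_cons_of_pos (p := p) (by simp [h0])]
      have := ih m (by simpa using hk) (fun j hj => by
        have := h (j+1) (by simpa using Nat.succ_lt_succ hj)
        simpa [Nat.succ_lt_succ_iff] using this)
      omega

theorem pv_bisectLeft_eq_countP (s : List Int) (x : Int) (hs : s.Pairwise (· ≤ ·)) :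
    PySem.List.bisectLeft s x = s.countP (fun e => decide (e < x)) := by
  obtain ⟨hle, hlt, hge⟩ := PySem.List.bisectLeft_spec s x hs
  refine (pv_countP_eq_of_cut s _ _ hle (fun j hj => ?_)).symm
  by_cases hc : j < PySem.List.bisectLeft s x
  · simp [hc, hlt j hj hc]
  · have := hge j hj (by omega)
    simp [hc]; omega

theorem pv_bisectRight_eq_countP (s : List Int) (x : Int) (hs : s.Pairwise (· ≤ ·)) :
    PySem.List.bisectRight s x = s.countP (fun e => decide (e ≤ x)) := by
  obtain ⟨hle, hlt, hge⟩ := PySem.List.bisectRight_spec s x hs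
  refine (pv_countP_eq_of_cut s _ _ hle (fun j hj => ?_)).symm
  by_cases hc : j < PySem.List.bisectRight s x
  · simp [hc, hlt j hj hc]
  · have := hge j hj (by omega)
    simp [hc]; omega

-- for 0 < d the strict upper count splits into the lower count plus the open-window count
theorem pv_split (l : List Int) (x d : Int) (hd : 0 < d) :
    l.countP (fun e => decide (e < x + d))
      = l.countP (fun e => decide (e ≤ x - d)) + l.countP (fun e => decide (x - d < e) && decide (e < x + d)) := by
  induction l with
  | nil => simp
  | cons a t ih =>
    simp only [List.countP_cons, ih, Bool.and_eq_true, decide_eq_true_eq]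
    split_ifs <;> omega

-- the clamped bisect difference counts the open window |x - e| < d
theorem pv_window (l : List Int) (x d : Int) :
    (if ((l.countP (fun e => decide (e < x + d)) : Int) - (l.countP (fun e => decide (e ≤ x - d)) : Int)) > 0
     then ((l.countP (fun e => decide (e < x + d)) : Int) - (l.countP (fun e => decide (e ≤ x - d)) : Int))
     else 0) = (l.countP (fun e => decide (|x - e| < d)) : Int) := by
  have habs : l.countP (fun e => decide (|x - e| < d))
      = l.countP (fun e => decide (x - d < e) && decide (e < x + d)) := by
    apply List.countP_congr
    intro e _
    by_cases h1 : x - d < e <;> by_cases h2 : e < x + d <;>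
      simp [h1, h2, abs_lt] <;> omega
  rw [habs]
  by_cases hd : d ≤ 0
  · have hzero : l.countP (fun e => decide (x - d < e) && decide (e < x + d)) = 0 := by
      apply List.countP_eq_zero.mpr
      intro e _
      simp
      intro h; omega
    have hmono : l.countP (fun e => decide (e < x + d)) ≤ l.countP (fun e => decide (e ≤ x - d)) := by
      apply List.countP_mono_left
      intro e _ he
      simp at he ⊢; omega
    rw [hzero, if_neg (by omega)]
    simp
  · have hd' : 0 < d := by omega
    rw [pv_split l x d hd']
    by_cases hc : (0:Int) < l.countP (fun e => decide (x - d < e) && decide (e < x + d))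
    · rw [if_pos (by push_cast; omega)]; push_cast; ring
    · rw [if_neg (by push_cast; omega)]; omega

-- A's per-pair counter as a sum of per-element window counts
theorem pv_check_eq_sum (a1 a2 : List Int) (d : Int) :
    check_difference_in_array a1 a2 d
      = (a1.map (fun x => (a2.countP (fun e => decide (|x - e| < d)) : Int))).sum := by
  unfold check_difference_in_array
  have hinner : ∀ (x : Int) (acc : Int),
      a2.foldl (fun counter e => if |x - e| < d then counter + 1 else counter) acc
        = acc + (a2.countP (fun e => decide (|x - e| < d)) : Int) := by
    intro x acc
    exact PySem.List.foldl_ite_add_one _ _ _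
  calc a1.foldl (fun counter x => a2.foldl (fun c e => if |x - e| < d then c + 1 else c) counter) 0
      = a1.foldl (fun counter x => counter + (a2.countP (fun e => decide (|x - e| < d)) : Int)) 0 := by
        apply PySem.List.foldl_congr_mem
        intro acc x _
        exact hinner x acc
    _ = _ := by
        rw [PySem.List.foldl_add]
        simp

-- the two per-pair counters agree
theorem pv_counter_eq (a1 a2 : List Int) (d : Int) :
    (a1.foldl (fun counter x =>
      let c : Int := (PySem.List.bisectLeft (PySem.List.sorted a2 (fun e => e) false) (x + d) : Int)
                   - (PySem.List.bisectRight (PySem.List.sorted a2 (fun e => e) false) (x - d) : Int)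
      if c > 0 then counter + c else counter) 0) = check_difference_in_array a1 a2 d := by
  rw [pv_check_eq_sum]
  have hs : (PySem.List.sorted a2 (fun e => e) false).Pairwise (· ≤ ·) := by
    simpa using PySem.List.sorted_pairwise a2 (fun e => e)
  have hperm : (PySem.List.sorted a2 (fun e => e) false).Perm a2 := PySem.List.sorted_perm a2 _ _
  have hstep : ∀ (x acc : Int),
      (let c : Int := (PySem.List.bisectLeft (PySem.List.sorted a2 (fun e => e) false) (x + d) : Int)
                   - (PySem.List.bisectRight (PySem.List.sorted a2 (fun e => e) false) (x - d) : Int)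
       if c > 0 then acc + c else acc)
        = acc + (a2.countP (fun e => decide (|x - e| < d)) : Int) := by
    intro x acc
    have hL := pv_bisectLeft_eq_countP (PySem.List.sorted a2 (fun e => e) false) (x + d) hs
    have hR := pv_bisectRight_eq_countP (PySem.List.sorted a2 (fun e => e) false) (x - d) hs
    have hw := pv_window a2 x d
    simp only [hL, hR, hperm.countP_eq]
    by_cases hc : ((a2.countP (fun e => decide (e < x + d)) : Int) - (a2.countP (fun e => decide (e ≤ x - d)) : Int)) > 0
    · rw [if_pos hc] at hw ⊢
      omega
    · rw [if_neg hc] at hw ⊢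
      omega
  calc _ = a1.foldl (fun acc x => acc + (a2.countP (fun e => decide (|x - e| < d)) : Int)) 0 := by
        apply PySem.List.foldl_congr_mem
        intro acc x _
        exact hstep x acc
    _ = _ := by
        rw [PySem.List.foldl_add]
        simp

theorem pv_check_nonneg (a1 a2 : List Int) (d : Int) : 0 ≤ check_difference_in_array a1 a2 d := by
  rw [pv_check_eq_sum]
  apply List.sum_nonneg
  intro x hx
  simp at hx
  obtain ⟨e, _, he⟩ := hx
  omega

theorem pv_foldl_const {α β : Type} (l : List α) (g : β → β) (h : β) :
    l.foldl (fun d _ => g d) h = g^[l.length] h := by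
  induction l generalizing h with
  | nil => rfl
  | cons a t ih => simp [List.foldl_cons, ih, Function.iterate_succ_apply]

-- one add_or_append is a setdefault followed by an append of one element
theorem pv_add_or_append_eq (h : PySem.Dict String (List String)) (k v : String) :
    add_or_append h k v = (h.setdefault k []).modify k [] (fun l => l ++ [v]) := by
  unfold add_or_append PySem.Dict.setdefault
  by_cases hc : h.contains k
  · simp [hc]
  · simp only [hc, Bool.false_eq_true, if_false]
    congr 1
    apply PySem.Dict.ext
    rw [PySem.Dict.items_insert_of_not_contains (h := by simpa using hc)]

-- n ≥ 1 repetitions of add_or_append are one setdefault plus an append of n copies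
theorem pv_iter_add_or_append (h : PySem.Dict String (List String)) (k v : String) (n : Nat) (hn : 1 ≤ n) :
    (fun d => add_or_append d k v)^[n] h
      = (h.setdefault k []).modify k [] (fun l => l ++ List.replicate n v) := by
  induction n with
  | zero => omega
  | succ m ih =>
    rcases Nat.eq_or_lt_of_le hn with h1 | h1
    · simp only [← h1]
      simpa using pv_add_or_append_eq h k v
    · have hm : 1 ≤ m := by omega
      rw [Function.iterate_succ_apply', ih hm]
      set s := h.setdefault k [] with hs
      have hcon : (s.modify k [] (fun l => l ++ List.replicate m v)).contains k := by
        unfold PySem.Dict.modify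
        exact PySem.Dict.contains_insert_self _ _ _
      rw [pv_add_or_append_eq, PySem.Dict.setdefault_of_contains (h := hcon)]
      unfold PySem.Dict.modify
      rw [PySem.Dict.insert_insert_self, PySem.Dict.getD_insert_self]
      congr 1
      rw [List.replicate_succ']
      simp [List.append_assoc]

-- ===== VERDICT (by name: the statement is the Claim_ definition above) =====
theorem process_data_hash_spec : Claim_equal_process_data_hash := by
  intro items_hash maxDiff _dom
  unfold Spec_process_data_hash process_data_hash process_data_hash_alt
  congr 1
  apply PySem.List.foldl_congr_mem
  intro acc item _
  dsimp only
  rw [List.foldl_map]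
  apply PySem.List.foldl_congr_mem
  intro acc1 p1 _
  rw [List.foldl_map]
  apply PySem.List.foldl_congr_mem
  intro acc2 p2 _
  dsimp only
  by_cases hne : p1.1 ≠ p2.1
  · rw [if_pos hne, if_pos hne]
    rw [pv_counter_eq p1.2 p2.2 maxDiff]
    set k := check_difference_in_array p1.2 p2.2 maxDiff with hk
    have hk0 : 0 ≤ k := pv_check_nonneg _ _ _
    by_cases hkz : k ≠ 0
    · rw [if_pos hkz, if_pos hkz]
      rw [pv_foldl_const]
      have hlen : (PySem.List.pyRange 0 k 1).length = k.toNat := by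
        rw [PySem.List.length_pyRange_one]; omega
      rw [hlen]
      exact pv_iter_add_or_append acc2 p1.1 p2.1 k.toNat (by omega)
    · rw [if_neg hkz, if_neg hkz]
  · rw [if_neg hne, if_neg hne]
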